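-- pv_equiv track=rewrite | github.com/Sharkfac3/SharkStreamerBot | Tools/ArtPipeline/review.py | infer_spec_status
-- ===== SOURCE A (Python) =====
-- from typing import Any, Sequence
--
-- IMAGE_STATUS_APPROVED = "approved"
--
-- IMAGE_STATUS_REJECTED = "rejected"
--
-- SPEC_STATUS_PENDING = "pending_review"
--
-- SPEC_STATUS_APPROVED = "approved"
--
-- SPEC_STATUS_REGEN = "needs_regeneration"
--
-- SPEC_STATUS_FAILED = "generation_failed"
--
-- def infer_spec_status(images: list[dict[str, Any]], error: Any) -> str:
--     if error:
--         return SPEC_STATUS_FAILED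
--     if any(image.get("status") == IMAGE_STATUS_APPROVED for image in images):
--         return SPEC_STATUS_APPROVED
--     if images and all(image.get("status") == IMAGE_STATUS_REJECTED for image in images):
--         return SPEC_STATUS_REGEN
--     return SPEC_STATUS_PENDING
-- ===== SOURCE B (Python) =====
-- IMAGE_STATUS_APPROVED = "approved"
-- IMAGE_STATUS_REJECTED = "rejected"
-- SPEC_STATUS_PENDING = "pending_review"
-- SPEC_STATUS_APPROVED = "approved"
-- SPEC_STATUS_REGEN = "needs_regeneration"
-- SPEC_STATUS_FAILED = "generation_failed"
--
-- def infer_spec_status(images, error):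
--     if error:
--         return SPEC_STATUS_FAILED
--     # single-pass state machine: 0 = no image seen, 1 = every image so far rejected,
--     # 2 = some non-rejected (non-approved) image seen
--     state = 0
--     for image in images:
--         s = image.get("status")
--         if s == IMAGE_STATUS_APPROVED:
--             return SPEC_STATUS_APPROVED
--         if s == IMAGE_STATUS_REJECTED:
--             if state == 0:
--                 state = 1
--         else:
--             state = 2
--     return SPEC_STATUS_REGEN if state == 1 else SPEC_STATUS_PENDING
-- ===== Notes on version B (the rewrite author's own statement) =====
-- stated objective: alternative
-- what changed: Replaces A's two staged short-circuit any/all generator scans (plus a non-emptiness guard) by one explicit loop running a three-state machine (no image / all rejected so far / some other status), returning APPROVED on the fly and reading REGEN vs PENDING off the final state.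
import Mathlib
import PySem

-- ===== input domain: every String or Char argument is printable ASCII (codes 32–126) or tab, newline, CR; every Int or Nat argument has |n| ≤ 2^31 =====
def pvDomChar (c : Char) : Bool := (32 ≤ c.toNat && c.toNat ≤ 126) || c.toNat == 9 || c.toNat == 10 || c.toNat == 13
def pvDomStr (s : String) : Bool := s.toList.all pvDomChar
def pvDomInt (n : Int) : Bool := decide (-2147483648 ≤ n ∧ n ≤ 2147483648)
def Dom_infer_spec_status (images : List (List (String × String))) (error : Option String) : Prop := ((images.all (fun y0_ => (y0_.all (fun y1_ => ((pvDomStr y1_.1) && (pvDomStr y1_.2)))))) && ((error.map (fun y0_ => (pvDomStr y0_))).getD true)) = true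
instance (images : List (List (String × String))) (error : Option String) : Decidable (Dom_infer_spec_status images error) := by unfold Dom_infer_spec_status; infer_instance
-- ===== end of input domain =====

-- B replaces A's two staged any/all scans by one explicit loop running a three-state
-- machine (0 = no image seen, 1 = all rejected so far, 2 = other status seen); alternative, same cost.

-- Python truthiness of the Option String argument `error` ('' and None are falsy)
def pvErrTruthy (error : Option String) : Bool :=
  match error with
  | none => false
  | some s => s ≠ ""

-- ===== PORT A =====
def infer_spec_status (images : List (List (String × String))) (error : Option String) : String :=
  if pvErrTruthy error then "generation_failed"
  else if images.any (fun image => (PySem.Dict.mk image).get? "status" == some "approved") then "approved"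
  else if !images.isEmpty && images.all (fun image => (PySem.Dict.mk image).get? "status" == some "rejected") then "needs_regeneration"
  else "pending_review"

-- ===== PORT B =====
-- the state-machine loop of Source B (early return on an approved image)
def pvAltLoop : List (List (String × String)) → Int → String
  | [], state => if state == 1 then "needs_regeneration" else "pending_review"
  | image :: rest, state =>
      let s := (PySem.Dict.mk image).get? "status"
      if s == some "approved" then "approved"
      else if s == some "rejected" then
        pvAltLoop rest (if state == 0 then 1 else state)
      else
        pvAltLoop rest 2

def infer_spec_status_alt (images : List (List (String × String))) (error : Option String) : String :=
  if pvErrTruthy error then "generation_failed"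
  else pvAltLoop images 0

-- ===== PRECONDITION & SPEC =====
def Spec_infer_spec_status (images : List (List (String × String))) (error : Option String) (out : String) : Prop := out = infer_spec_status_alt images error
instance (images : List (List (String × String))) (error : Option String) (out : String) : Decidable (Spec_infer_spec_status images error out) := by unfold Spec_infer_spec_status; infer_instance

-- ===== CLAIM (what is proved, stated in full; the proofs are below) =====
def Claim_equal_infer_spec_status : Prop := ∀ (images : List (List (String × String))) (error : Option String), Dom_infer_spec_status images error → Spec_infer_spec_status images error (infer_spec_status images error)

-- ===== LEMMAS AND PROOFS =====

-- characterisation of the state-machine loop for an arbitrary incoming state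
theorem pvAltLoop_eq (images : List (List (String × String))) : ∀ (state : Int),
    pvAltLoop images state =
      if images.any (fun image => (PySem.Dict.mk image).get? "status" == some "approved") then "approved"
      else if (state == 1 && images.all (fun image => (PySem.Dict.mk image).get? "status" == some "rejected"))
              || (state == 0 && !images.isEmpty && images.all (fun image => (PySem.Dict.mk image).get? "status" == some "rejected")) then "needs_regeneration"
      else "pending_review" := by
  induction images with
  | nil =>
      intro state
      simp [pvAltLoop]
  | cons image rest ih =>
      intro state
      by_cases ha : (PySem.Dict.mk image).get? "status" = some "approved"
      · simp [pvAltLoop, ha]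
      · by_cases hr : (PySem.Dict.mk image).get? "status" = some "rejected"
        · simp only [pvAltLoop, hr, beq_iff_eq, reduceIte, ih]
          by_cases h0 : state = 0 <;> simp [h0, hr]
        · simp [pvAltLoop, ha, hr, ih]

-- ===== VERDICT (by name: the statement is the Claim_ definition above) =====
theorem infer_spec_status_spec : Claim_equal_infer_spec_status := by
  intro images error _
  unfold Spec_infer_spec_status infer_spec_status infer_spec_status_alt
  by_cases he : pvErrTruthy error
  · simp [he]
  · simp only [he, if_false, Bool.false_eq_true, pvAltLoop_eq]
    rcases h : images.any (fun image => (PySem.Dict.mk image).get? "status" == some "approved") with _ | _ <;>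
      simp
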